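-- pv_equiv track=rewrite | github.com/lucasros98/nlp_healthcare | py_scripts/augmentation.py | create_label_dict
-- ===== SOURCE A (Python) =====
-- def create_label_dict(X, Y):
--     label_dict = {}
--     for tokens, labels in zip(X, Y):
--         for token, label in zip(tokens, labels):
--             _label = label if label == 'O' else label[2:]
--             if _label in label_dict:
--                 label_dict[_label].append(token)
--             else:
--                 label_dict[_label] = [token]
--     return label_dict
-- ===== SOURCE B (Python) =====
-- def create_label_dict(X, Y):
--     pairs = [(lab if lab == 'O' else lab[2:], tok)
--              for toks, labs in zip(X, Y)
--              for tok, lab in zip(toks, labs)]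
--     keys = dict.fromkeys(k for k, _ in pairs)
--     return {k: [t for k2, t in pairs if k2 == k] for k in keys}
-- ===== Notes on version B (the rewrite author's own statement) =====
-- stated objective: alternative
-- what changed: Replaces the incremental bucket-append dict with a flatten-then-group pass: build one flat (key, token) list, take the first-seen distinct keys, and collect each key's tokens by a per-key filter comprehension.
import Mathlib
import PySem

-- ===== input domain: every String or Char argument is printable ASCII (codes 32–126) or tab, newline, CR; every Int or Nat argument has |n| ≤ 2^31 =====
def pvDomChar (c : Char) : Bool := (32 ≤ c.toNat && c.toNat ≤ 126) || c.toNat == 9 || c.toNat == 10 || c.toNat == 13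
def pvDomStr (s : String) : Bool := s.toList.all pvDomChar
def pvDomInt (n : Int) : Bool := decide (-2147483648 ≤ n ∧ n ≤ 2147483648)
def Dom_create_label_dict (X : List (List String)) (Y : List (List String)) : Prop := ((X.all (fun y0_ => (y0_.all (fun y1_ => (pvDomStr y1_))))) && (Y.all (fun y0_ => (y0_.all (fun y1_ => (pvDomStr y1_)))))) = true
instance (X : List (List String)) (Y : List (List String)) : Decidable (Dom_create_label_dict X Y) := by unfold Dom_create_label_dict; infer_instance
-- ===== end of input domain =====

-- B replaces A's incremental bucket-append dict with a flatten-then-group pass (flat pair list,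
-- first-seen distinct keys, per-key filter); same result, proved equal.


-- ===== PORT A =====
def create_label_dict (X : List (List String)) (Y : List (List String)) : List (String × List String) :=
  ((X.zip Y).foldl
    (fun d p =>
      (p.1.zip p.2).foldl
        (fun d q =>
          let _label := if q.2 = "O" then q.2 else PySem.Str.slice q.2 (some 2) none
          if d.contains _label then d.modify _label [] (fun v => v ++ [q.1])
          else d.insert _label [q.1]) d)
    PySem.Dict.empty).items

-- ===== PORT B =====
def create_label_dict_alt (X : List (List String)) (Y : List (List String)) : List (String × List String) :=
  let pairs := (X.zip Y).flatMap (fun p =>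
    (p.1.zip p.2).map (fun q =>
      ((if q.2 = "O" then q.2 else PySem.Str.slice q.2 (some 2) none), q.1)))
  let keys := PySem.List.dedup (pairs.map (fun pr => pr.1))
  keys.map (fun k => (k, (pairs.filter (fun pr => pr.1 == k)).map (fun pr => pr.2)))

-- ===== PRECONDITION & SPEC =====
def Spec_create_label_dict (X : List (List String)) (Y : List (List String)) (out : List (String × List String)) : Prop := out = create_label_dict_alt X Y
instance (X : List (List String)) (Y : List (List String)) (out : List (String × List String)) : Decidable (Spec_create_label_dict X Y out) := by unfold Spec_create_label_dict; infer_instance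

-- ===== CLAIM (what is proved, stated in full; the proofs are below) =====
def Claim_equal_create_label_dict : Prop := ∀ (X : List (List String)) (Y : List (List String)), Dom_create_label_dict X Y → Spec_create_label_dict X Y (create_label_dict X Y)

-- ===== LEMMAS AND PROOFS =====

-- A's branch (append if present, else fresh singleton) is exactly one Dict.modify step
theorem stepA_eq_modify (d : PySem.Dict String (List String)) (k t : String) :
    (if d.contains k then d.modify k [] (fun v => v ++ [t]) else d.insert k [t])
      = d.modify k [] (fun v => v ++ [t]) := by
  by_cases h : d.contains k = true
  · simp [h]
  · simp only [Bool.not_eq_true] at h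
    simp [h, PySem.Dict.modify, PySem.Dict.getD_of_not_contains _ _ h]

-- A's nested loop is the flat modify-fold over B's pair list
theorem nested_eq_flat (X Y : List (List String)) :
    (X.zip Y).foldl
      (fun d p =>
        (p.1.zip p.2).foldl
          (fun d q =>
            let _label := if q.2 = "O" then q.2 else PySem.Str.slice q.2 (some 2) none
            if d.contains _label then d.modify _label [] (fun v => v ++ [q.1])
            else d.insert _label [q.1]) d)
      (PySem.Dict.empty : PySem.Dict String (List String))
    = ((X.zip Y).flatMap (fun p =>
        (p.1.zip p.2).map (fun q =>
          ((if q.2 = "O" then q.2 else PySem.Str.slice q.2 (some 2) none), q.1)))).foldl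
        (fun d pr => d.modify pr.1 [] (fun v => v ++ [pr.2])) PySem.Dict.empty := by
  rw [List.foldl_flatMap]
  congr 1
  funext d p
  rw [List.foldl_map]
  congr 1
  funext d q
  exact stepA_eq_modify d _ q.1

-- ===== VERDICT (by name: the statement is the Claim_ definition above) =====
theorem create_label_dict_spec : Claim_equal_create_label_dict := by
  intro X Y _
  show create_label_dict X Y = create_label_dict_alt X Y
  unfold create_label_dict create_label_dict_alt
  rw [nested_eq_flat]
  set pairs := (X.zip Y).flatMap (fun p =>
    (p.1.zip p.2).map (fun q =>
      ((if q.2 = "O" then q.2 else PySem.Str.slice q.2 (some 2) none), q.1)))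
  have hnd : (pairs.foldl (fun d pr => d.modify pr.1 [] (fun v => v ++ [pr.2]))
      (PySem.Dict.empty : PySem.Dict String (List String))).keys.Nodup :=
    PySem.Dict.nodup_keys_foldl_modify_key pairs (fun pr => pr.1) []
      (fun _ pr v => v ++ [pr.2]) _ PySem.Dict.nodup_keys_empty
  rw [PySem.Dict.items_eq_map_keys _ hnd []]
  rw [PySem.Dict.keys_foldl_modify_key pairs (fun pr => pr.1) [] (fun _ pr v => v ++ [pr.2])]
  rw [PySem.Dict.keys_empty]
  have hk : PySem.Set.update ([] : PySem.Set String) (pairs.map (fun pr => pr.1))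
      = PySem.Set.ofList (pairs.map (fun pr => pr.1)) := rfl
  rw [hk]
  simp only [PySem.List.dedup_eq_ofList, PySem.Dict.getD_foldl_modify_append,
    PySem.Dict.getD_empty, List.nil_append]
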